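-- pv_equiv track=rewrite | github.com/tslgithub/myxxy | code/tools.py | get_most_min_x
-- ===== SOURCE A (Python) =====
-- def get_most_min_x(data):
--     hash = {"0":0}
--     v = sorted(data)
--     x_min = -15
--     sorts = []
--     while x_min < 9999:
--         x_min = get_sort_x_min(v, x_min)
--         if x_min >= 9999:
--             break
--         sort = []
--         for loc in v:
--             if loc <= x_min + 15 and loc>= x_min:
--                 sort.append(loc)
--         sort_list = sorted(sort)
--         sorts.append([sort_list[0],len(sort_list)])
--     return sorted(sorts, key=lambda loc: loc[1])[-1]
--
-- def get_sort_x_min(data, x_min):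
--     ck_min = 9999
--     for loc in data:
--         if loc>=x_min+15:
--             ck_min = min(ck_min, loc)
--     return ck_min
-- ===== SOURCE B (Python) =====
-- def get_most_min_x(data):
--     # One pass over the sorted data: walk anchors left-to-right, count each
--     # window [a, a+15] by a forward scan, keep the last best (>= ties).
--     v = sorted(data)
--     n = len(v)
--     best = None
--     i = 0
--     thr = 0
--     while i < n:
--         a = v[i]
--         if a < thr:
--             i += 1
--             continue
--         if a >= 9999:
--             break
--         j = i
--         while j < n and v[j] <= a + 15:
--             j += 1
--         cnt = j - i
--         if best is None or cnt >= best[1]: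
--             best = [a, cnt]
--         thr = a + 15
--         i += 1
--     return best
-- ===== Notes on version B (the rewrite author's own statement) =====
-- stated objective: faster
-- what changed: Replaces A's repeated full scans (a min-scan over all data to find each anchor plus a full filter-and-sort per window) by one sort followed by a single left-to-right pass over the sorted array that finds each anchor and counts its window in place, keeping the running best (ties to the later anchor) instead of sorting the result list at the end.
-- outside the precondition, e.g. on get_most_min_x([]): A raises IndexError, B returns None; on get_most_min_x([-3, 10000]): A raises IndexError, B returns None
import Mathlib
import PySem

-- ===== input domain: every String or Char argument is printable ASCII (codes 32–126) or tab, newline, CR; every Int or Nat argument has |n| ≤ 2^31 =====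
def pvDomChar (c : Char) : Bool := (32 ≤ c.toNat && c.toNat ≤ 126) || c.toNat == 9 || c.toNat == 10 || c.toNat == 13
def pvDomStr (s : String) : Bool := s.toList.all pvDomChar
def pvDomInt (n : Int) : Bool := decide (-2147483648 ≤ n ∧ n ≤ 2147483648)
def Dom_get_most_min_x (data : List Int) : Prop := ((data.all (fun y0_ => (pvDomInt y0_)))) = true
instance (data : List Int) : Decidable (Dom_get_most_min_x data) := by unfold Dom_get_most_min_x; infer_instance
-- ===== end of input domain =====

-- B replaces A's repeated full min-scans and per-window filter+sort by one sort followed by a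
-- single left-to-right pass over the sorted array (objective: faster).

-- ===== PORT A =====
def get_sort_x_min (data : List Int) (x_min : Int) : Int :=
  data.foldl (fun ck_min loc => if x_min + 15 ≤ loc then min ck_min loc else ck_min) 9999

-- termination helper for loopA (cited in its decreasing_by)
lemma gsxm_lt_mem (v : List Int) (t : Int) (h : get_sort_x_min v t < 9999) :
    get_sort_x_min v t ∈ v ∧ t + 15 ≤ get_sort_x_min v t := by
  have H : ∀ (w : List Int) (c : Int),
      w.foldl (fun ck_min loc => if t + 15 ≤ loc then min ck_min loc else ck_min) c = c ∨
      (w.foldl (fun ck_min loc => if t + 15 ≤ loc then min ck_min loc else ck_min) c ∈ w ∧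
       t + 15 ≤ w.foldl (fun ck_min loc => if t + 15 ≤ loc then min ck_min loc else ck_min) c) := by
    intro w
    induction w with
    | nil => intro c; exact Or.inl rfl
    | cons x xs ih =>
      intro c
      simp only [List.foldl_cons]
      by_cases hx : t + 15 ≤ x
      · rw [if_pos hx]
        rcases ih (min c x) with h1 | h1
        · rcases min_choice c x with hm | hm
          · exact Or.inl (by rw [h1, hm])
          · refine Or.inr ⟨?_, ?_⟩ <;> rw [h1, hm]
            · exact List.mem_cons_self
            · exact hx
        · exact Or.inr ⟨List.mem_cons_of_mem _ h1.1, h1.2⟩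
      · rw [if_neg hx]
        exact (ih c).imp id (fun h1 => ⟨List.mem_cons_of_mem _ h1.1, h1.2⟩)
  rcases H v 9999 with h1 | h1
  · exfalso; unfold get_sort_x_min at h; omega
  · exact h1

-- termination helper for loopA (cited in its decreasing_by)
lemma countP_anchor_lt (v : List Int) (t m : Int) (hm : m ∈ v) (hle : t + 15 ≤ m) :
    v.countP (fun l => decide (m + 15 ≤ l)) < v.countP (fun l => decide (t + 15 ≤ l)) := by
  induction v with
  | nil => cases hm
  | cons x xs ih =>
    simp only [List.countP_cons]
    rcases List.mem_cons.mp hm with rfl | hmem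
    · have hmono : xs.countP (fun l => decide (m + 15 ≤ l)) ≤ xs.countP (fun l => decide (t + 15 ≤ l)) :=
        List.countP_mono_left (fun y _ hy => by
          simp only [decide_eq_true_eq] at hy ⊢; omega)
      have h1 : (decide (m + 15 ≤ m)) = false := by simp only [decide_eq_false_iff_not]; omega
      have h2 : (decide (t + 15 ≤ m)) = true := by simp only [decide_eq_true_eq]; omega
      rw [h1, h2]; simp only [if_true, if_false, Bool.false_eq_true]; omega
    · have ih' := ih hmem
      have hx : (if decide (m + 15 ≤ x) = true then 1 else 0) ≤ (if decide (t + 15 ≤ x) = true then 1 else 0) := by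
        simp only [decide_eq_true_eq]; split_ifs <;> omega
      omega

-- the window list, its sort, and the appended pair [sort_list[0], len(sort_list)] of one iteration of A
def windowPair (v : List Int) (x : Int) : Int × Int :=
  let sort := v.foldl (fun acc loc => if loc ≤ x + 15 ∧ x ≤ loc then acc ++ [loc] else acc) ([] : List Int)
  let sort_list := PySem.List.sorted sort (fun y => y) false
  (PySem.List.pyGetD sort_list 0 0, (sort_list.length : Int))

-- A's while loop (state: x_min and the accumulated sorts)
def loopA (v : List Int) (x_min : Int) (sorts : List (Int × Int)) : List (Int × Int) :=
  if x_min < 9999 then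
    if h2 : 9999 ≤ get_sort_x_min v x_min then sorts
    else loopA v (get_sort_x_min v x_min) (sorts ++ [windowPair v (get_sort_x_min v x_min)])
  else sorts
termination_by v.countP (fun l => decide (x_min + 15 ≤ l))
decreasing_by
  have h := gsxm_lt_mem v x_min (by omega)
  exact countP_anchor_lt v x_min _ h.1 h.2

def get_most_min_x (data : List Int) : List Int :=
  -- `hash = {"0":0}` in A is dead code and is omitted
  match PySem.List.pyGet? (PySem.List.sorted (loopA (PySem.List.sorted data (fun x => x) false) (-15) []) (fun p => p.2) false) (-1) with
  | some p => [p.1, p.2]       -- the last entry of the stable sort by count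
  | none => []                 -- Python raises IndexError here (no window found); outside Pre_

-- ===== PORT B =====
-- `if best is None or cnt >= best[1]: best = [a, cnt]`
def pickBest (best : Option (Int × Int)) (a cnt : Int) : Option (Int × Int) :=
  match best with
  | none => some (a, cnt)
  | some b => if b.2 ≤ cnt then some (a, cnt) else some b

-- B's inner while loop: advance j while j < n and v[j] <= lim
def innerScan (v : List Int) (lim : Int) (j : Nat) : Nat :=
  if h : j < v.length then
    if v[j] ≤ lim then innerScan v lim (j + 1) else j
  else j
termination_by v.length - j

-- B's outer while loop over the index i into the sorted list
def loopB (v : List Int) (i : Nat) (thr : Int) (best : Option (Int × Int)) : Option (Int × Int) :=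
  if h : i < v.length then
    if v[i] < thr then loopB v (i + 1) thr best
    else if 9999 ≤ v[i] then best
    else loopB v (i + 1) (v[i] + 15)
           (pickBest best v[i] ((innerScan v (v[i] + 15) i : Int) - (i : Int)))
  else best
termination_by v.length - i

def get_most_min_x_alt (data : List Int) : List Int :=
  match loopB (PySem.List.sorted data (fun x => x) false) 0 0 none with
  | some p => [p.1, p.2]
  | none => []                 -- Python B returns None here; outside Pre_

-- ===== PRECONDITION & SPEC =====
-- Pre_ excludes exactly the inputs without any element that is nonnegative and less than 9999:
-- there A finds no window and its final indexing of the empty result list raises IndexError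
-- (Python B returns None there).
def Pre_get_most_min_x (data : List Int) : Prop := ∃ x ∈ data, 0 ≤ x ∧ x < 9999
instance (data : List Int) : Decidable (Pre_get_most_min_x data) := by unfold Pre_get_most_min_x; infer_instance
def pvWitness_get_most_min_x : List Int := [3, 20, 21]

def Spec_get_most_min_x (data : List Int) (out : List Int) : Prop := out = get_most_min_x_alt data
instance (data : List Int) (out : List Int) : Decidable (Spec_get_most_min_x data out) := by unfold Spec_get_most_min_x; infer_instance

-- ===== CLAIM (what is proved, stated in full; the proofs are below) =====
def Claim_equal_get_most_min_x : Prop := ∀ (data : List Int), Dom_get_most_min_x data → Pre_get_most_min_x data → Spec_get_most_min_x data (get_most_min_x data)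

-- ===== LEMMAS AND PROOFS =====

-- running "last best" fold over the produced (anchor, count) pairs
def lastBest (l : List (Int × Int)) : Option (Int × Int) :=
  l.foldl (fun b x => pickBest b x.1 x.2) none

lemma pairwise_snd_getLast_max {s : List (Int × Int)} {b : Int × Int}
    (h : List.Pairwise (fun a c => a.2 ≤ c.2) s) (hb : s.getLast? = some b) :
    ∀ y ∈ s, y.2 ≤ b.2 := by
  obtain ⟨ys, rfl⟩ := List.getLast?_eq_some_iff.mp hb
  intro y hy
  rcases List.mem_append.mp hy with hy | hy
  · exact (List.pairwise_append.mp h).2.2 y hy b (by simp)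
  · simp only [List.mem_singleton] at hy; subst hy; exact le_refl _

lemma insertBy_cons_eq (before : (Int × Int) → (Int × Int) → Bool) (x z : Int × Int) (t : List (Int × Int)) :
    PySem.List.insertBy before x (z :: t) =
      if before x z then x :: z :: t else z :: PySem.List.insertBy before x t := by
  simp [PySem.List.insertBy]

lemma insertBy_ne_nil (before : (Int × Int) → (Int × Int) → Bool) (x : Int × Int) (ys : List (Int × Int)) :
    PySem.List.insertBy before x ys ≠ [] := by
  induction ys with
  | nil => simp [PySem.List.insertBy]
  | cons z t ih =>
    rw [insertBy_cons_eq]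
    split_ifs
    · exact List.cons_ne_nil _ _
    · exact List.cons_ne_nil _ _

lemma getLast?_insertBy (before : (Int × Int) → (Int × Int) → Bool) (x : Int × Int) :
    ∀ (ys : List (Int × Int)), (∃ y ∈ ys, before x y = true) →
      (PySem.List.insertBy before x ys).getLast? = ys.getLast? := by
  intro ys
  induction ys with
  | nil => rintro ⟨y, hy, -⟩; cases hy
  | cons z t ih =>
    rintro ⟨y, hy, hb⟩
    rw [insertBy_cons_eq]
    by_cases hz : before x z = true
    · rw [if_pos hz, List.getLast?_cons_cons]
    · rw [if_neg hz]
      have hyt : y ∈ t := by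
        rcases List.mem_cons.mp hy with rfl | hmem
        · exact absurd hb hz
        · exact hmem
      have ih' := ih ⟨y, hyt, hb⟩
      cases t with
      | nil => cases hyt
      | cons t1 t2 =>
        cases hw : PySem.List.insertBy before x (t1 :: t2) with
        | nil => exact absurd hw (insertBy_ne_nil before x _)
        | cons w1 w2 =>
          rw [List.getLast?_cons_cons, ← hw, ih', List.getLast?_cons_cons]

lemma sorted_snd_getLast (l : List (Int × Int)) :
    (PySem.List.sorted l (fun p => p.2) false).getLast? = lastBest l := by
  induction l using List.reverseRecOn with
  | nil => rfl
  | append_singleton l x ih =>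
    have hsnoc : PySem.List.sorted (l ++ [x]) (fun p : Int × Int => p.2) false
        = PySem.List.insertBy (fun a b => decide (a.2 < b.2)) x (PySem.List.sorted l (fun p => p.2) false) := by
      rw [PySem.List.sorted_eq_foldl_insertBy, PySem.List.sorted_eq_foldl_insertBy, List.foldl_append]
      simp only [List.foldl_cons, List.foldl_nil]
    have hlb : lastBest (l ++ [x]) = pickBest (lastBest l) x.1 x.2 := by
      simp only [lastBest, List.foldl_append, List.foldl_cons, List.foldl_nil]
    rw [hsnoc, hlb, ← ih]
    cases hL : (PySem.List.sorted l (fun p => p.2) false).getLast? with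
    | none =>
      have h0 : PySem.List.sorted l (fun p => p.2) false = [] := List.getLast?_eq_none_iff.mp hL
      rw [h0, PySem.List.insertBy_of_forall_not_before _ _ _ (by intro y hy; cases hy)]
      simp [pickBest]
    | some b =>
      have hmax : ∀ y ∈ PySem.List.sorted l (fun p => p.2) false, y.2 ≤ b.2 :=
        pairwise_snd_getLast_max (PySem.List.sorted_pairwise l (fun p => p.2)) hL
      have hbmem : b ∈ PySem.List.sorted l (fun p => p.2) false := by
        obtain ⟨ys, hys⟩ := List.getLast?_eq_some_iff.mp hL
        rw [hys]; simp
      by_cases hxb : b.2 ≤ x.2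
      · rw [PySem.List.insertBy_of_forall_not_before _ _ _ (fun y hy => by
          simp only [decide_eq_false_iff_not, not_lt]
          exact le_trans (hmax y hy) hxb)]
        rw [List.getLast?_concat]
        simp [pickBest, hxb]
      · push_neg at hxb
        rw [getLast?_insertBy _ _ _ ⟨b, hbmem, by simp only [decide_eq_true_eq]; exact hxb⟩, hL]
        simp [pickBest, not_le.mpr hxb]

lemma foldl_min_of_le (t : List Int) (a : Int) (h : ∀ y ∈ t, a ≤ y) : t.foldl min a = a := by
  refine le_antisymm (PySem.List.foldl_min_le t a).1 ?_
  rcases PySem.List.foldl_min_mem t a with h1 | h1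
  · exact h1.ge
  · exact h _ h1

lemma foldl_min_glb (w : List Int) (m : Int) :
    ∀ (a : Int), m ∈ w → (∀ y ∈ w, m ≤ y) → w.foldl min a = min a m := by
  induction w with
  | nil => intro a h; cases h
  | cons x t ih =>
    intro a hm hall
    simp only [List.foldl_cons]
    rcases List.mem_cons.mp hm with rfl | hmt
    · by_cases hmt2 : m ∈ t
      · rw [ih (min a m) hmt2 (fun y hy => hall y (List.mem_cons_of_mem _ hy))]; omega
      · exact foldl_min_of_le t (min a m)
          (fun y hy => le_trans (min_le_right a m) (hall y (List.mem_cons_of_mem _ hy)))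
    · rw [ih (min a x) hmt (fun y hy => hall y (List.mem_cons_of_mem _ hy))]
      have hx : m ≤ x := hall x (by simp)
      omega

lemma gsxm_eq_of_none (v : List Int) (t : Int) (h : ∀ x ∈ v, x < t + 15) :
    get_sort_x_min v t = 9999 := by
  unfold get_sort_x_min
  rw [PySem.List.foldl_ite_eq_foldl_filter (p := fun loc => t + 15 ≤ loc) (f := fun a b => min a b)]
  rw [List.filter_eq_nil_iff.mpr (fun a ha => by
    simp only [decide_eq_true_eq, not_le]; exact h a ha)]
  rfl

lemma gsxm_eq (v : List Int) (t m : Int) (hm : m ∈ v) (hmp : t + 15 ≤ m)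
    (hmin : ∀ x ∈ v, t + 15 ≤ x → m ≤ x) : get_sort_x_min v t = min 9999 m := by
  unfold get_sort_x_min
  rw [PySem.List.foldl_ite_eq_foldl_filter (p := fun loc => t + 15 ≤ loc) (f := fun a b => min a b)]
  apply foldl_min_glb
  · exact List.mem_filter.mpr ⟨hm, by simp only [decide_eq_true_eq]; omega⟩
  · intro y hy
    obtain ⟨hyv, hyp⟩ := List.mem_filter.mp hy
    simp only [decide_eq_true_eq] at hyp
    exact hmin y hyv hyp

lemma innerScan_le (v : List Int) (lim : Int) (j : Nat) :
    j ≤ innerScan v lim j ∧ innerScan v lim j ≤ max j v.length := by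
  fun_induction innerScan v lim j with
  | case1 j h hle ih => omega
  | case2 j h hgt => omega
  | case3 j h => omega

lemma innerScan_within (v : List Int) (lim : Int) (j : Nat) :
    ∀ k (hk : k < v.length), j ≤ k → k < innerScan v lim j → v[k] ≤ lim := by
  fun_induction innerScan v lim j with
  | case1 j h hle ih =>
    intro k hk hjk hkr
    by_cases hkj : k = j
    · subst hkj; exact hle
    · exact ih k hk (by omega) hkr
  | case2 j h hgt => intro k hk hjk hkr; exact absurd hkr (by omega)
  | case3 j h => intro k hk hjk hkr; exact absurd hkr (by omega)

lemma innerScan_stop (v : List Int) (lim : Int) (j : Nat) (h : innerScan v lim j < v.length) :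
    lim < v[innerScan v lim j] := by
  fun_induction innerScan v lim j with
  | case1 j hlt hle ih => exact ih h
  | case2 j hlt hgt => omega
  | case3 j hnl => exact absurd h hnl

lemma count_window (v : List Int) (hv : List.Pairwise (· ≤ ·) v) (i' : Nat) (hfi : i' < v.length)
    (m : Int) (hmeq : v[i'] = m)
    (hmin : ∀ k (hk : k < v.length), k < i' → v[k] < m) :
    ((v.countP (fun l => decide (l ≤ m + 15 ∧ m ≤ l)) : Nat) : Int)
      = ((innerScan v (m + 15) i' : Nat) : Int) - (i' : Int) := by
  have hb := innerScan_le v (m + 15) i'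
  set r := innerScan v (m + 15) i' with hr
  have hir : i' ≤ r := hb.1
  have hrlen : r ≤ v.length := by omega
  have hpw := List.pairwise_iff_getElem.mp hv
  have hdecomp : v = v.take i' ++ ((v.drop i').take (r - i') ++ (v.drop i').drop (r - i')) := by
    rw [List.take_append_drop, List.take_append_drop]
  have hdd : (v.drop i').drop (r - i') = v.drop r := by
    rw [List.drop_drop]; congr 1; omega
  have hcount : v.countP (fun l => decide (l ≤ m + 15 ∧ m ≤ l)) = r - i' := by
    conv_lhs => rw [hdecomp, hdd]
    rw [List.countP_append, List.countP_append]
    have h1 : (v.take i').countP (fun l => decide (l ≤ m + 15 ∧ m ≤ l)) = 0 := by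
      refine List.countP_eq_zero.mpr (fun a ha => ?_)
      obtain ⟨j, hj, rfl⟩ := List.mem_take_iff_getElem.mp ha
      have hja : j < i' := by omega
      have hlt := hmin j (by omega) hja
      simp only [decide_eq_true_eq, not_and, not_le]
      intro _
      omega
    have h3 : (v.drop r).countP (fun l => decide (l ≤ m + 15 ∧ m ≤ l)) = 0 := by
      refine List.countP_eq_zero.mpr (fun a ha => ?_)
      obtain ⟨j, hj, rfl⟩ := List.mem_drop_iff_getElem.mp ha
      have hrl : r < v.length := by omega
      have hstop : m + 15 < v[r]'hrl := innerScan_stop v (m + 15) i' hrl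
      have hge : v[r] ≤ v[r + j] := by
        rcases Nat.eq_zero_or_pos j with rfl | hj0
        · exact le_of_eq (by congr)
        · exact hpw r (r + j) hrl (by omega) (by omega)
      simp only [decide_eq_true_eq, not_and, not_le]
      intro hle
      exfalso
      omega
    have h2 : ((v.drop i').take (r - i')).countP (fun l => decide (l ≤ m + 15 ∧ m ≤ l))
        = ((v.drop i').take (r - i')).length := by
      refine List.countP_eq_length.mpr (fun a ha => ?_)
      obtain ⟨j, hj, rfl⟩ := List.mem_take_iff_getElem.mp ha
      have hjlen : j < v.length - i' := by
        have := List.length_drop (i := i') (l := v); omega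
      have hget : (v.drop i')[j]'(by omega) = v[i' + j]'(by omega) := List.getElem_drop
      have hwithin := innerScan_within v (m + 15) i' (i' + j) (by omega) (by omega) (by omega)
      have hgem : m ≤ v[i' + j]'(by omega) := by
        rcases Nat.eq_zero_or_pos j with rfl | hj0
        · exact le_of_eq hmeq.symm
        · have h' := hpw i' (i' + j) hfi (by omega) (by omega)
          omega
      simp only [decide_eq_true_eq]
      constructor
      · omega
      · omega
    rw [h1, h2, h3, List.length_take, List.length_drop]
    omega
  rw [hcount]
  omega

lemma windowPair_eq (v : List Int) (hv : List.Pairwise (· ≤ ·) v) (m : Int) (hm : m ∈ v) :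
    windowPair v m = (m, ((v.countP (fun l => decide (l ≤ m + 15 ∧ m ≤ l)) : Nat) : Int)) := by
  unfold windowPair
  rw [PySem.List.foldl_append_ite_eq_filter (p := fun loc => loc ≤ m + 15 ∧ m ≤ loc)]
  simp only [List.nil_append]
  have hsorted : PySem.List.sorted (v.filter (fun l => decide (l ≤ m + 15 ∧ m ≤ l))) (fun y => y) false
      = v.filter (fun l => decide (l ≤ m + 15 ∧ m ≤ l)) :=
    PySem.List.sorted_eq_self_of_pairwise _ _ (List.Pairwise.filter _ hv)
  rw [hsorted]
  have hmw : m ∈ v.filter (fun l => decide (l ≤ m + 15 ∧ m ≤ l)) :=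
    List.mem_filter.mpr ⟨hm, by simp only [decide_eq_true_eq]; omega⟩
  obtain ⟨w1, wt, hwc⟩ := List.exists_cons_of_ne_nil (List.ne_nil_of_mem hmw)
  have hpair : List.Pairwise (· ≤ ·) (v.filter (fun l => decide (l ≤ m + 15 ∧ m ≤ l))) :=
    List.Pairwise.filter _ hv
  have hhead : w1 = m := by
    refine le_antisymm ?_ ?_
    · rw [hwc] at hmw hpair
      rcases List.mem_cons.mp hmw with rfl | hmem
      · exact le_refl _
      · exact (List.pairwise_cons.mp hpair).1 m hmem
    · have hw1 : w1 ∈ v.filter (fun l => decide (l ≤ m + 15 ∧ m ≤ l)) := by rw [hwc]; simp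
      have := (List.mem_filter.mp hw1).2
      simp only [decide_eq_true_eq] at this
      exact this.2
  rw [hwc]
  rw [PySem.List.pyGetD_zero]
  refine Prod.ext ?_ ?_
  · simpa using hhead
  · simp only []
    rw [← hwc, List.countP_eq_length_filter]

lemma loopB_ge_len (v : List Int) (i : Nat) (thr : Int) (best : Option (Int × Int))
    (h : ¬ i < v.length) : loopB v i thr best = best := by
  rw [loopB, dif_neg h]

lemma loopB_advance (v : List Int) (thr : Int) (best : Option (Int × Int)) :
    ∀ (d i i' : Nat), i' - i = d → i ≤ i' →
      (∀ k (hk : k < v.length), i ≤ k → k < i' → v[k] < thr) →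
      loopB v i thr best = loopB v i' thr best := by
  intro d
  induction d with
  | zero =>
    intro i i' h1 h2 _
    have : i = i' := by omega
    rw [this]
  | succ n ih =>
    intro i i' h1 h2 hk
    have hii : i < i' := by omega
    by_cases hlen : i < v.length
    · conv_lhs => rw [loopB]
      rw [dif_pos hlen, if_pos (hk i hlen (le_refl _) hii)]
      exact ih (i + 1) i' (by omega) (by omega) (fun k hk2 h3 h4 => hk k hk2 (by omega) h4)
    · rw [loopB_ge_len v i thr best hlen, loopB_ge_len v i' thr best (by omega)]

lemma loopB_stop (v : List Int) (thr : Int) (best : Option (Int × Int)) :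
    ∀ (d i : Nat), v.length - i ≤ d → (∀ k (hk : k < v.length), i ≤ k → v[k] < thr) →
      loopB v i thr best = best := by
  intro d
  induction d with
  | zero => intro i h1 h2; exact loopB_ge_len v i thr best (by omega)
  | succ n ih =>
    intro i h1 h2
    by_cases hlen : i < v.length
    · conv_lhs => rw [loopB]
      rw [dif_pos hlen, if_pos (h2 i hlen (le_refl _))]
      exact ih (i + 1) (by omega) (fun k hk2 h3 => h2 k hk2 (by omega))
    · exact loopB_ge_len v i thr best hlen

lemma bridge_stop (v : List Int) (t : Int) (i : Nat) (sorts : List (Int × Int))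
    (ht : t < 9999) (hnone : ∀ x ∈ v, x < t + 15) :
    lastBest (loopA v t sorts) = loopB v i (t + 15) (lastBest sorts) := by
  have hA : loopA v t sorts = sorts := by
    rw [loopA, if_pos ht, dif_pos (by rw [gsxm_eq_of_none v t hnone])]
  rw [hA, loopB_stop v (t + 15) (lastBest sorts) (v.length - i) i (le_refl _)
    (fun k hk _ => hnone v[k] (List.getElem_mem hk))]

lemma bridge (v : List Int) (hv : List.Pairwise (· ≤ ·) v) :
    ∀ (n : Nat) (t : Int) (i : Nat) (sorts : List (Int × Int)),
      v.countP (fun l => decide (t + 15 ≤ l)) ≤ n → t < 9999 →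
      (∀ k (hk : k < v.length), k < i → v[k] < t + 15) →
      lastBest (loopA v t sorts) = loopB v i (t + 15) (lastBest sorts) := by
  intro n
  induction n with
  | zero =>
    intro t i sorts hc ht hi
    have h0 := List.countP_eq_zero.mp (Nat.le_zero.mp hc)
    refine bridge_stop v t i sorts ht (fun x hx => ?_)
    have := h0 x hx
    simp only [decide_eq_true_eq, not_le] at this
    omega
  | succ n ih =>
    intro t i sorts hc ht hi
    by_cases hE : ∃ x ∈ v, t + 15 ≤ x
    · have hfi : v.findIdx (fun l => decide (t + 15 ≤ l)) < v.length :=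
        List.findIdx_lt_length.mpr (by
          obtain ⟨x, hx, hx2⟩ := hE
          exact ⟨x, hx, by simp only [decide_eq_true_eq]; omega⟩)
      set i' := v.findIdx (fun l => decide (t + 15 ≤ l)) with hi'
      have hPi' : t + 15 ≤ v[i'] := by
        have h := @List.findIdx_getElem _ (fun l => decide (t + 15 ≤ l)) v hfi
        simp only [decide_eq_true_eq] at h
        exact h
      have hmv : v[i'] ∈ v := List.getElem_mem hfi
      have hmin' : ∀ k (hk : k < v.length), k < i' → v[k] < t + 15 := by
        intro k hk hki
        have h := List.not_of_lt_findIdx (p := fun l => decide (t + 15 ≤ l)) (xs := v) hki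
        simp only [decide_eq_false_iff_not, not_le] at h
        exact h
      have hii' : i ≤ i' := by
        by_contra hcon
        push_neg at hcon
        have := hi i' hfi hcon
        omega
      have hminm : ∀ x ∈ v, t + 15 ≤ x → v[i'] ≤ x := by
        intro x hx hxp
        obtain ⟨k, hk, rfl⟩ := List.mem_iff_getElem.mp hx
        rcases lt_trichotomy k i' with h1 | h1 | h1
        · exact absurd hxp (by have := hmin' k hk h1; omega)
        · subst h1; exact le_refl _
        · exact List.pairwise_iff_getElem.mp hv i' k hfi hk h1
      have hgs : get_sort_x_min v t = min 9999 v[i'] := gsxm_eq v t v[i'] hmv hPi' hminm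
      by_cases hbig : 9999 ≤ v[i']
      · have hgs9 : get_sort_x_min v t = 9999 := by rw [hgs]; omega
        have hA : loopA v t sorts = sorts := by
          rw [loopA, if_pos ht, dif_pos (by rw [hgs9])]
        rw [hA, loopB_advance v (t + 15) (lastBest sorts) (i' - i) i i' rfl hii'
          (fun k hk _ h4 => hmin' k hk h4)]
        conv_rhs => rw [loopB]
        rw [dif_pos hfi, if_neg (by omega), if_pos hbig]
      · push_neg at hbig
        have hgsm : get_sort_x_min v t = v[i'] := by rw [hgs]; omega
        have hA : loopA v t sorts
            = loopA v v[i'] (sorts ++ [windowPair v v[i']]) := by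
          rw [loopA, if_pos ht, dif_neg (by rw [hgsm]; omega), hgsm]
        rw [hA, windowPair_eq v hv v[i'] hmv]
        have hcount' : v.countP (fun l => decide (v[i'] + 15 ≤ l)) ≤ n := by
          have := countP_anchor_lt v t v[i'] hmv hPi'
          omega
        have hinv : ∀ k (hk : k < v.length), k < i' + 1 → v[k] < v[i'] + 15 := by
          intro k hk hki
          rcases Nat.lt_succ_iff_lt_or_eq.mp hki with h1 | h1
          · have := hmin' k hk h1; omega
          · subst h1; omega
        have happ := ih v[i'] (i' + 1) (sorts ++ [(v[i'], ((v.countP (fun l => decide (l ≤ v[i'] + 15 ∧ v[i'] ≤ l)) : Nat) : Int))])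
          hcount' (by omega) hinv
        rw [happ]
        rw [loopB_advance v (t + 15) (lastBest sorts) (i' - i) i i' rfl hii'
          (fun k hk _ h4 => hmin' k hk h4)]
        conv_rhs => rw [loopB]
        rw [dif_pos hfi, if_neg (by omega), if_neg (by omega)]
        have hlast : lastBest (sorts ++ [(v[i'], ((v.countP (fun l => decide (l ≤ v[i'] + 15 ∧ v[i'] ≤ l)) : Nat) : Int))])
            = pickBest (lastBest sorts) v[i'] ((v.countP (fun l => decide (l ≤ v[i'] + 15 ∧ v[i'] ≤ l)) : Nat) : Int) := by
          simp only [lastBest, List.foldl_append, List.foldl_cons, List.foldl_nil]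
        rw [hlast, count_window v hv i' hfi v[i'] rfl (fun k hk hki => by have := hmin' k hk hki; omega)]
    · push_neg at hE
      exact bridge_stop v t i sorts ht hE
  
-- ===== VERDICT (by name: the statement is the Claim_ definition above) =====
theorem get_most_min_x_spec : Claim_equal_get_most_min_x := by
  intro data _hdom _hpre
  unfold Spec_get_most_min_x
  unfold get_most_min_x get_most_min_x_alt
  have hv : List.Pairwise (· ≤ ·) (PySem.List.sorted data (fun x => x) false) := by
    have := PySem.List.sorted_pairwise data (fun x => x)
    exact this
  rw [PySem.List.pyGet?_neg_one, sorted_snd_getLast]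
  have h := bridge (PySem.List.sorted data (fun x => x) false) hv
    ((PySem.List.sorted data (fun x => x) false).countP (fun l => decide ((-15 : Int) + 15 ≤ l)))
    (-15) 0 [] (le_refl _) (by norm_num) (fun k hk h0 => absurd h0 (Nat.not_lt_zero k))
  have h15 : (-15 : Int) + 15 = 0 := by norm_num
  rw [h15] at h
  rw [show lastBest [] = none from rfl] at h
  rw [h]
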